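-- pv_equiv track=rewrite | github.com/Mahdiizadi1998/RAG_geothermal | geothermal-rag/agents/ingestion_agent.py | _find_wells_in_table_content
-- ===== SOURCE A (Python) =====
-- from typing import Dict, List, Optional
--
-- def _find_wells_in_table_content(headers: List[str], rows: List[List[str]],
--                                   document_wells: List[str]) -> List[str]:
--     """
--     Find well names in table content (headers + cell values)
--
--     Args:
--         headers: List of column headers
--         rows: List of row data
--         document_wells: List of well names to search for
--
--     Returns:
--         List of well names found in table content
--     """
--     # Combine all table text
--     table_text = ' '.join(headers) + ' '
--     for row in rows:
--         table_text += ' '.join(str(cell) for cell in row) + ' '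
--
--     # Find all well names in table text
--     found_wells = []
--     for well in document_wells:
--         if well in table_text:
--             found_wells.append(well)
--
--     return found_wells
-- ===== SOURCE B (Python) =====
-- def _find_wells_in_table_content(headers, rows, document_wells):
--     # Single left-to-right scan of the table text: bucket the wells by first
--     # character, and at each position prefix-test only the not-yet-found wells
--     # whose first character matches there (multi-pattern position scan),
--     # stopping early once every well has been found.
--     text = ''.join(' '.join(p) + ' ' for p in [headers] + rows)
--     targets = set(document_wells)
--     buckets = {}
--     for w in targets:
--         if w:
--             buckets.setdefault(w[0], set()).add(w)
--     found = {w for w in targets if not w}   # '' occurs in any text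
--     for i, c in enumerate(text):
--         if len(found) == len(targets):
--             break
--         for w in buckets.get(c, ()):
--             if w not in found and text.startswith(w, i):
--                 found.add(w)
--     return [w for w in document_wells if w in found]
-- ===== Notes on version B (the rewrite author's own statement) =====
-- stated objective: alternative
-- what changed: B replaces A's per-well substring search over the whole text by a single left-to-right scan over text positions: wells are bucketed by first character, each position prefix-tests only the not-yet-found wells whose first character matches there, with early exit once every well is found, and the found set is expanded back over document_wells.
import Mathlib
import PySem

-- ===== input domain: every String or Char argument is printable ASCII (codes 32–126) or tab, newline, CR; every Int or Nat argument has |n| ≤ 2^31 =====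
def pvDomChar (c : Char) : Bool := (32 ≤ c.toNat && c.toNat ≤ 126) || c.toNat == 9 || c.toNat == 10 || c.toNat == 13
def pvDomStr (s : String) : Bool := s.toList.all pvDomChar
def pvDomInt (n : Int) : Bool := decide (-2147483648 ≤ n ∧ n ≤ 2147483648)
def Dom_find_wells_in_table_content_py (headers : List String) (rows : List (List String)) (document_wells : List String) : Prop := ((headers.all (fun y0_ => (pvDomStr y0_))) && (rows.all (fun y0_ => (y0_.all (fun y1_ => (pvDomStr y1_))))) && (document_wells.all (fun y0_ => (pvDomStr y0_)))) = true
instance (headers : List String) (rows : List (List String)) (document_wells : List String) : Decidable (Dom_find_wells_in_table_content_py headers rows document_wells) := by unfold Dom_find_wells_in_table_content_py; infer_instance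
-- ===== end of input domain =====

-- B replaces A's per-well substring search by a single left-to-right scan over text
-- positions, prefix-testing each not-yet-found well at each position (with early exit
-- once all wells are found); objective: alternative structure, same exact result.

-- ===== PORT A =====
def find_wells_in_table_content_py (headers : List String) (rows : List (List String)) (document_wells : List String) : List String :=
  -- table_text = ' '.join(headers) + ' '; for row in rows: table_text += ' '.join(row) + ' '
  let table_text : String :=
    rows.foldl (fun acc row => acc ++ (PySem.Str.join " " row ++ " "))
      (PySem.Str.join " " headers ++ " ")
  -- found_wells = []; for well in document_wells: if well in table_text: found_wells.append(well)
  document_wells.foldl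
    (fun found well => if PySem.Str.isIn well table_text then found ++ [well] else found) []

-- ===== PORT B =====
-- buckets: for w in targets: if w: buckets.setdefault(w[0], set()).add(w)
def pvBuckets (targets : PySem.Set String) : PySem.Dict Char (PySem.Set String) :=
  targets.foldl
    (fun d w =>
      match w.toList with
      | [] => d
      | c :: _ => PySem.Dict.insert d c (PySem.Set.add (PySem.Dict.getD d c PySem.Set.empty) w))
    PySem.Dict.empty

-- inner loop: for w in buckets.get(c, ()): if w not in found and text.startswith(w, i): found.add(w)
-- (text.startswith(w, i) with 0 ≤ i ≤ len(text) is exactly 'w.toList is a prefix of text.drop i';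
--  the scan below carries the current suffix text.drop i)
def pvAltInner (suffix : List Char) (found : PySem.Set String) (bs : List String) : PySem.Set String :=
  bs.foldl
    (fun fd w => if !PySem.Set.contains fd w && w.toList.isPrefixOf suffix then PySem.Set.add fd w else fd)
    found

-- for i, c in enumerate(text): if len(found) == len(targets): break; <inner loop>
-- (structural recursion on the remaining suffix of the text; its head is the current character c)
def pvAltScan (buckets : PySem.Dict Char (PySem.Set String)) (targets : PySem.Set String) : List Char → PySem.Set String → PySem.Set String
  | [], found => found
  | c :: rest, found =>
      if found.length == targets.length then found
      else pvAltScan buckets targets rest (pvAltInner (c :: rest) found (PySem.Dict.getD buckets c []))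

def find_wells_in_table_content_py_alt (headers : List String) (rows : List (List String)) (document_wells : List String) : List String :=
  -- text = ''.join(' '.join(p) + ' ' for p in [headers] + rows)
  let text : String := PySem.Str.join "" ((headers :: rows).map (fun p => PySem.Str.join " " p ++ " "))
  -- targets = set(document_wells); buckets as above
  let targets : PySem.Set String := PySem.Set.ofList document_wells
  let buckets : PySem.Dict Char (PySem.Set String) := pvBuckets targets
  -- found = {w for w in targets if not w}   ('' occurs in any text)
  let found0 : PySem.Set String := targets.filter (fun w => w == "")
  -- <scan loop>
  let found : PySem.Set String := pvAltScan buckets targets text.toList found0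
  -- return [w for w in document_wells if w in found]
  document_wells.filter (fun w => PySem.Set.contains found w)

-- ===== PRECONDITION & SPEC =====
def Spec_find_wells_in_table_content_py (headers : List String) (rows : List (List String)) (document_wells : List String) (out : List String) : Prop := out = find_wells_in_table_content_py_alt headers rows document_wells
instance (headers : List String) (rows : List (List String)) (document_wells : List String) (out : List String) : Decidable (Spec_find_wells_in_table_content_py headers rows document_wells out) := by unfold Spec_find_wells_in_table_content_py; infer_instance

-- ===== CLAIM (what is proved, stated in full; the proofs are below) =====
def Claim_equal_find_wells_in_table_content_py : Prop := ∀ (headers : List String) (rows : List (List String)) (document_wells : List String), Dom_find_wells_in_table_content_py headers rows document_wells → Spec_find_wells_in_table_content_py headers rows document_wells (find_wells_in_table_content_py headers rows document_wells)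

-- ===== LEMMAS AND PROOFS =====

-- one step of B's inner loop
lemma pvStep_mem (suffix : List Char) (fd : PySem.Set String) (v w : String) :
    (w ∈ if !PySem.Set.contains fd v && v.toList.isPrefixOf suffix then PySem.Set.add fd v else fd)
      ↔ w ∈ fd ∨ (w = v ∧ v.toList <+: suffix) := by
  by_cases hp : v.toList <+: suffix
  · by_cases hc : v ∈ fd
    · rw [if_neg]
      · constructor
        · exact Or.inl
        · rintro (h | ⟨rfl, _⟩); exacts [h, hc]
      · simp [PySem.Set.contains_eq_listContains, hc]
    · rw [if_pos]
      · rw [PySem.Set.mem_add]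
        constructor
        · rintro (h | rfl); exacts [Or.inl h, Or.inr ⟨rfl, hp⟩]
        · rintro (h | ⟨rfl, _⟩); exacts [Or.inl h, Or.inr rfl]
      · simp [PySem.Set.contains_eq_listContains, hc, List.isPrefixOf_iff_prefix, hp]
  · rw [if_neg]
    · constructor
      · exact Or.inl
      · rintro (h | ⟨rfl, hp'⟩); exacts [h, absurd hp' hp]
    · simp [List.isPrefixOf_iff_prefix, hp]

-- membership in the result of B's inner loop
lemma mem_pvAltInner (suffix : List Char) (bs : List String) (w : String) :
    ∀ found, w ∈ pvAltInner suffix found bs ↔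
      w ∈ found ∨ (w ∈ bs ∧ w.toList <+: suffix) := by
  unfold pvAltInner
  induction bs with
  | nil => simp
  | cons t ts ih =>
      intro found
      simp only [List.foldl_cons]
      rw [ih, pvStep_mem]
      simp only [List.mem_cons]
      constructor
      · rintro ((h | ⟨rfl, hp⟩) | ⟨h1, h2⟩)
        exacts [Or.inl h, Or.inr ⟨Or.inl rfl, hp⟩, Or.inr ⟨Or.inr h1, h2⟩]
      · rintro (h | ⟨h1 | h1, h2⟩)
        exacts [Or.inl (Or.inl h), Or.inl (Or.inr ⟨h1, h1 ▸ h2⟩), Or.inr ⟨h1, h2⟩]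

lemma nodup_pvAltInner (suffix : List Char) (bs : List String) :
    ∀ found : PySem.Set String, found.Nodup → (pvAltInner suffix found bs).Nodup := by
  unfold pvAltInner
  induction bs with
  | nil => exact fun _ h => h
  | cons t ts ih =>
      intro found h
      simp only [List.foldl_cons]
      split
      · exact ih _ (PySem.Set.nodup_add _ _ h)
      · exact ih _ h

-- the bucket of character c holds exactly the nonempty wells of ws starting with c (on top of d's bucket)
lemma getD_pvBuckets_aux (ws : List String) (c : Char) (w : String) :
    ∀ d : PySem.Dict Char (PySem.Set String),
      w ∈ PySem.Dict.getD
            (ws.foldl (fun d w =>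
              match w.toList with
              | [] => d
              | c :: _ => PySem.Dict.insert d c (PySem.Set.add (PySem.Dict.getD d c PySem.Set.empty) w)) d)
            c []
        ↔ w ∈ PySem.Dict.getD d c [] ∨ (w ∈ ws ∧ w.toList.head? = some c) := by
  induction ws with
  | nil => simp
  | cons v vs ih =>
      intro d
      simp only [List.foldl_cons]
      rw [ih]
      rcases hv : v.toList with _ | ⟨c0, t⟩
      · simp only [List.mem_cons]
        constructor
        · rintro (h | ⟨h1, h2⟩)
          · exact Or.inl h
          · exact Or.inr ⟨Or.inr h1, h2⟩
        · rintro (h | ⟨h1 | h1, h2⟩)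
          · exact Or.inl h
          · rw [h1, hv] at h2; cases h2
          · exact Or.inr ⟨h1, h2⟩
      · have hgd : PySem.Dict.getD (PySem.Dict.insert d c0 (PySem.Set.add (PySem.Dict.getD d c0 PySem.Set.empty) v)) c []
            = if c = c0 then PySem.Set.add (PySem.Dict.getD d c0 PySem.Set.empty) v else PySem.Dict.getD d c [] := by
          by_cases hcc : c = c0
          · subst hcc; simp [PySem.Dict.getD_insert_self, PySem.Set.empty]
          · rw [if_neg hcc, PySem.Dict.getD_insert_of_ne _ _ _ hcc]
        rw [hgd]
        by_cases hcc : c = c0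
        · subst hcc
          rw [if_pos rfl, PySem.Set.mem_add]
          simp only [List.mem_cons, PySem.Set.empty]
          constructor
          · rintro ((h | rfl) | ⟨h1, h2⟩)
            · exact Or.inl h
            · exact Or.inr ⟨Or.inl rfl, by rw [hv]; rfl⟩
            · exact Or.inr ⟨Or.inr h1, h2⟩
          · rintro (h | ⟨h1 | h1, h2⟩)
            · exact Or.inl (Or.inl h)
            · exact Or.inl (Or.inr h1)
            · exact Or.inr ⟨h1, h2⟩
        · rw [if_neg hcc]
          simp only [List.mem_cons]
          constructor
          · rintro (h | ⟨h1, h2⟩)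
            · exact Or.inl h
            · exact Or.inr ⟨Or.inr h1, h2⟩
          · rintro (h | ⟨h1 | h1, h2⟩)
            · exact Or.inl h
            · exact absurd h2 (by rw [h1, hv]; simp; exact fun hh => hcc hh.symm)
            · exact Or.inr ⟨h1, h2⟩

lemma getD_pvBuckets (targets : PySem.Set String) (c : Char) (w : String) :
    w ∈ PySem.Dict.getD (pvBuckets targets) c []
      ↔ w ∈ targets ∧ w.toList.head? = some c := by
  unfold pvBuckets
  rw [getD_pvBuckets_aux]
  simp [PySem.Dict.getD, PySem.Dict.get?, PySem.Dict.empty]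

-- a nonempty prefix of c :: r starts with c
lemma head?_of_prefix_cons (l : List Char) (c : Char) (r : List Char)
    (h1 : l ≠ []) (h2 : l <+: c :: r) : l.head? = some c := by
  rcases h2 with ⟨t, ht⟩
  cases l with
  | nil => exact absurd rfl h1
  | cons a u => cases ht; rfl

-- membership in the result of B's scan loop
lemma mem_pvAltScan (targets : PySem.Set String) (w : String) :
    ∀ (s : List Char) (found : PySem.Set String), found.Nodup → (∀ v ∈ found, v ∈ targets) →
      (w ∈ pvAltScan (pvBuckets targets) targets s found ↔
        w ∈ found ∨ (w ∈ targets ∧ w.toList ≠ [] ∧ ∃ k < s.length, w.toList <+: s.drop k)) := by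
  intro s
  induction s with
  | nil => intro found _ _; simp [pvAltScan]
  | cons c rest ih =>
      intro found hn hs
      rw [pvAltScan]
      split
      · rename_i hlen
        -- break: found already contains every target
        have hall : ∀ v ∈ targets, v ∈ found := by
          have hsp : List.Subperm found targets := hn.subperm (fun _ hv => hs _ hv)
          have hperm := hsp.perm_of_length_le (le_of_eq (Nat.eq_of_beq_eq_true (by simpa using hlen)).symm)
          exact fun v hv => hperm.mem_iff.mpr hv
        constructor
        · exact Or.inl
        · rintro (h | ⟨h1, _⟩)
          · exact h
          · exact hall w h1
      · rw [ih _ (nodup_pvAltInner _ _ _ hn)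
            (fun v hv => ((mem_pvAltInner (c :: rest) _ v found).mp hv).elim (hs v)
              (fun hb => ((getD_pvBuckets targets c v).mp hb.1).1))]
        rw [mem_pvAltInner]
        constructor
        · rintro ((h | ⟨hb, hp⟩) | ⟨h1, hne, k, hk, h2⟩)
          · exact Or.inl h
          · rcases (getD_pvBuckets targets c w).mp hb with ⟨ht, hh⟩
            refine Or.inr ⟨ht, ?_, 0, Nat.succ_pos _, by simpa using hp⟩
            intro hnil; rw [hnil] at hh; cases hh
          · exact Or.inr ⟨h1, hne, k + 1, Nat.succ_lt_succ hk, h2⟩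
        · rintro (h | ⟨h1, hne, k, hk, h2⟩)
          · exact Or.inl (Or.inl h)
          · cases k with
            | zero =>
                have hp : w.toList <+: c :: rest := by simpa using h2
                exact Or.inl (Or.inr ⟨(getD_pvBuckets targets c w).mpr
                  ⟨h1, head?_of_prefix_cons _ _ _ hne hp⟩, hp⟩)
            | succ k => exact Or.inr ⟨h1, hne, k, Nat.lt_of_succ_lt_succ (by simpa using hk), h2⟩

-- bounded position-wise prefix match = substring, for a nonempty text
lemma exists_lt_prefix_iff_isIn (sub T : List Char) (hT : T ≠ []) :
    (∃ k < T.length, sub <+: T.drop k) ↔ PySem.Chars.isIn sub T = true := by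
  constructor
  · rintro ⟨k, _, hk⟩
    exact (PySem.Chars.exists_prefix_drop_iff_isIn sub T).mp ⟨k, hk⟩
  · intro h
    rcases (PySem.Chars.exists_prefix_drop_iff_isIn sub T).mpr h with ⟨j, hj⟩
    by_cases hsub : sub = []
    · exact ⟨0, List.length_pos_iff.mpr hT, by simp [hsub]⟩
    · refine ⟨j, ?_, hj⟩
      by_contra hjl
      have : T.drop j = [] := List.drop_eq_nil_of_le (by omega)
      rw [this] at hj
      exact hsub (List.prefix_nil.mp hj)

-- ''.join is concatenation (the empty-separator case of join)
lemma join_empty_sep (parts : List (List Char)) : PySem.Chars.join [] parts = parts.flatten := by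
  induction parts with
  | nil => rfl
  | cons p ps ih =>
      cases ps with
      | nil => simp [PySem.Chars.join_singleton]
      | cons q qs => rw [PySem.Chars.join_cons_cons]; simp [ih]

-- A's accumulator loop over rows, on the character level
lemma textA_toList (rows : List (List String)) (init : String) :
    (rows.foldl (fun acc row => acc ++ (PySem.Str.join " " row ++ " ")) init).toList
      = init.toList ++ (rows.map (fun r => (PySem.Str.join " " r).toList ++ [' '])).flatten := by
  induction rows generalizing init with
  | nil => simp
  | cons r rs ih => simp [ih]

-- the two table texts agree character for character
lemma text_eq (headers : List String) (rows : List (List String)) :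
    (rows.foldl (fun acc row => acc ++ (PySem.Str.join " " row ++ " "))
        (PySem.Str.join " " headers ++ " ")).toList
      = (PySem.Str.join "" ((headers :: rows).map (fun p => PySem.Str.join " " p ++ " "))).toList := by
  rw [textA_toList]
  have hemp : ("" : String).toList = ([] : List Char) := rfl
  have hsp : (" " : String).toList = [' '] := rfl
  simp [PySem.Str.toList_join, hemp, hsp, join_empty_sep, Function.comp_def]

-- B's text is never empty (the headers piece ends with a space)
lemma textB_ne_nil (headers : List String) (rows : List (List String)) :
    (PySem.Str.join "" ((headers :: rows).map (fun p => PySem.Str.join " " p ++ " "))).toList ≠ [] := by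
  have hemp : ("" : String).toList = ([] : List Char) := rfl
  simp [PySem.Str.toList_join, hemp, join_empty_sep, Function.comp_def]

theorem find_wells_in_table_content_py_spec' (headers : List String) (rows : List (List String)) (document_wells : List String) :
    find_wells_in_table_content_py headers rows document_wells
      = find_wells_in_table_content_py_alt headers rows document_wells := by
  unfold find_wells_in_table_content_py find_wells_in_table_content_py_alt
  rw [PySem.List.foldl_append_if_eq_filter]
  simp only [List.nil_append]
  apply List.filter_congr
  intro w hw
  have htext := text_eq headers rows
  have hne := textB_ne_nil headers rows
  have hscan := mem_pvAltScan (PySem.Set.ofList document_wells) w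
    (PySem.Str.join "" ((headers :: rows).map (fun p => PySem.Str.join " " p ++ " "))).toList
    ((PySem.Set.ofList document_wells).filter (fun w => w == ""))
    ((PySem.Set.nodup_ofList document_wells).filter _)
    (fun v hv => List.mem_of_mem_filter hv)
  have hiff := exists_lt_prefix_iff_isIn w.toList
    (PySem.Str.join "" ((headers :: rows).map (fun p => PySem.Str.join " " p ++ " "))).toList hne
  have hwt : w ∈ PySem.Set.ofList document_wells := (PySem.Set.mem_ofList document_wells w).mpr hw
  rw [Bool.eq_iff_iff]
  simp only [PySem.Str.isIn_eq, htext, PySem.Set.contains_eq_listContains, List.contains_eq_mem,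
    decide_eq_true_eq]
  rw [hscan]
  simp only [List.mem_filter, beq_iff_eq]
  constructor
  · intro h
    by_cases hemp : w = ""
    · exact Or.inl ⟨hwt, hemp⟩
    · have hnel : w.toList ≠ [] := fun hh =>
        hemp (String.toList_inj.mp (show w.toList = ("" : String).toList from hh))
      exact Or.inr ⟨hwt, hnel, hiff.mpr h⟩
  · rintro (⟨_, rfl⟩ | ⟨_, _, h2⟩)
    · exact PySem.Chars.isIn_nil _
    · exact hiff.mp h2

-- ===== VERDICT (by name: the statement is the Claim_ definition above) =====
theorem find_wells_in_table_content_py_spec : Claim_equal_find_wells_in_table_content_py := by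
  intro headers rows document_wells _
  exact find_wells_in_table_content_py_spec' headers rows document_wells
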